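-- pv_equiv track=rewrite | github.com/bob60bob123/chess-html-2 | backend/game/pieces.py | get_move_squares
-- ===== SOURCE A (Python) =====
-- from typing import TYPE_CHECKING, List, Tuple, Optional
--
-- def get_move_squares(from_pos: str, board: 'Board' = None) -> List[str]:
--     squares = []
--     file_idx = ord(from_pos[0]) - ord('a')
--     rank_idx = int(from_pos[1]) - 1
--     # All eight directions
--     for direction in [(0,1),(0,-1),(1,0),(-1,0),(1,1),(1,-1),(-1,1),(-1,-1)]:
--         for i in range(1, 8):
--             new_file = file_idx + direction[0] * i
--             new_rank = rank_idx + direction[1] * i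
--             if 0 <= new_file <= 7 and 0 <= new_rank <= 7:
--                 squares.append(chr(ord('a') + new_file) + str(new_rank + 1))
--     return squares
-- ===== SOURCE B (Python) =====
-- def get_move_squares(from_pos, board=None):
--     file_idx = ord(from_pos[0]) - ord('a')
--     rank_idx = int(from_pos[1]) - 1
--
--     def bounds(c, d):
--         # interval of step counts i with 0 <= c + d*i <= 7
--         if d > 0:
--             return -c, 7 - c
--         if d < 0:
--             return c - 7, c
--         return (1, 7) if 0 <= c <= 7 else (1, 0)
--
--     squares = []
--     for dx, dy in [(0,1),(0,-1),(1,0),(-1,0),(1,1),(1,-1),(-1,1),(-1,-1)]: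
--         flo, fhi = bounds(file_idx, dx)
--         rlo, rhi = bounds(rank_idx, dy)
--         lo = max(1, flo, rlo)
--         hi = min(7, fhi, rhi)
--         squares += [chr(ord('a') + file_idx + dx * i) + str(rank_idx + dy * i + 1)
--                     for i in range(lo, hi + 1)]
--     return squares
-- ===== Notes on version B (the rewrite author's own statement) =====
-- stated objective: alternative
-- what changed: A tests every one of the 7 probe squares in each of the 8 directions against the board bounds; B computes, per direction, the closed-form interval of step counts that stay on the board (max/min of per-axis limits) and emits exactly that contiguous run of squares with no per-square bounds check.
import Mathlib
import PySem

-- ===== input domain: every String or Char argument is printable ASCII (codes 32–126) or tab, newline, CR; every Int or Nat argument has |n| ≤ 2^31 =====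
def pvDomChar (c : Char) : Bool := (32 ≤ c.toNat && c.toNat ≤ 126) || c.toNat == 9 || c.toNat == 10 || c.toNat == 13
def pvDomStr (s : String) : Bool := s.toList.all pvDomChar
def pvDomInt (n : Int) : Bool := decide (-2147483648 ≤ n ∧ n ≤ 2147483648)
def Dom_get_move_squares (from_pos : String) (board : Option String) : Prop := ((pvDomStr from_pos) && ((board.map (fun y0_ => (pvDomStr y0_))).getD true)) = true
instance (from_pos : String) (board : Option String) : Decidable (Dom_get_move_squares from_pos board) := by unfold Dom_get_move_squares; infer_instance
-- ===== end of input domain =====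

-- B replaces A's per-square bounds test (8 directions × 7 probes) by a closed-form step
-- interval per direction and emits exactly that contiguous run of squares (objective: alternative).

-- ===== PORT A =====
def get_move_squares (from_pos : String) (board : Option String) : List String :=
  match PySem.Str.pyGet? from_pos 0, PySem.Str.pyGet? from_pos 1 with
  | some c0, some c1 =>
    match PySem.Int.ofChars? [c1] with
    | some v =>
      let file_idx : Int := (c0.toNat : Int) - 97
      let rank_idx : Int := v - 1
      ([((0:Int),(1:Int)), (0,-1), (1,0), (-1,0), (1,1), (1,-1), (-1,1), (-1,-1)]).foldl
        (fun squares direction =>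
          (PySem.List.pyRange 1 8).foldl
            (fun squares i =>
              let new_file := file_idx + direction.1 * i
              let new_rank := rank_idx + direction.2 * i
              if (decide (0 ≤ new_file) && decide (new_file ≤ 7) && decide (0 ≤ new_rank) && decide (new_rank ≤ 7)) = true then
                squares ++ [String.mk (Char.ofNat (97 + new_file).toNat :: PySem.Int.toChars (new_rank + 1))]
              else squares)
            squares)
        []
    | none => []
  | _, _ => []

-- ===== PORT B =====
-- interval of step counts i with 0 <= c + d*i <= 7 (for i ranging over 1..7)
def rayBounds (c d : Int) : Int × Int :=
  if 0 < d then (-c, 7 - c)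
  else if d < 0 then (c - 7, c)
  else if 0 ≤ c ∧ c ≤ 7 then (1, 7)
  else (1, 0)

def get_move_squares_alt (from_pos : String) (board : Option String) : List String :=
  (((PySem.Str.pyGet? from_pos 0).bind fun c0 =>
    (PySem.Str.pyGet? from_pos 1).bind fun c1 =>
    (PySem.Int.ofChars? [c1]).map fun v =>
      let file_idx : Int := (c0.toNat : Int) - 97
      let rank_idx : Int := v - 1
      ([((0:Int),(1:Int)), (0,-1), (1,0), (-1,0), (1,1), (1,-1), (-1,1), (-1,-1)]).foldl
        (fun squares d =>
          let fb := rayBounds file_idx d.1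
          let rb := rayBounds rank_idx d.2
          let lo := max 1 (max fb.1 rb.1)
          let hi := min 7 (min fb.2 rb.2)
          squares ++ (PySem.List.pyRange lo (hi + 1)).map
            (fun i => String.mk (Char.ofNat (97 + (file_idx + d.1 * i)).toNat :: PySem.Int.toChars ((rank_idx + d.2 * i) + 1))))
        []) : Option (List String)).getD []

-- ===== PRECONDITION & SPEC =====
-- Pre_: exactly the inputs where Python A returns: from_pos has at least two characters and
-- the second is a decimal digit (else from_pos[1] raises IndexError or int(...) raises ValueError).
def Pre_get_move_squares (from_pos : String) (board : Option String) : Prop :=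
  2 ≤ from_pos.toList.length ∧ PySem.Chars.isdigit (from_pos.toList.getD 1 ' ') = true
instance (from_pos : String) (board : Option String) : Decidable (Pre_get_move_squares from_pos board) := by unfold Pre_get_move_squares; infer_instance

def pvWitness_get_move_squares : String × Option String := ("d4", none)

def Spec_get_move_squares (from_pos : String) (board : Option String) (out : List String) : Prop := out = get_move_squares_alt from_pos board
instance (from_pos : String) (board : Option String) (out : List String) : Decidable (Spec_get_move_squares from_pos board out) := by unfold Spec_get_move_squares; infer_instance

-- ===== CLAIM (what is proved, stated in full; the proofs are below) =====
def Claim_equal_get_move_squares : Prop := ∀ (from_pos : String) (board : Option String), Dom_get_move_squares from_pos board → Pre_get_move_squares from_pos board → Spec_get_move_squares from_pos board (get_move_squares from_pos board)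

-- ===== LEMMAS AND PROOFS =====

lemma filter_interval (lo hi : Int) (h1 : 1 ≤ lo) (h2 : hi ≤ 7) (p : Int → Bool)
    (hp : ∀ i : Int, 1 ≤ i → i ≤ 7 → (p i = true ↔ lo ≤ i ∧ i ≤ hi)) :
    (PySem.List.pyRange 1 8).filter p = PySem.List.pyRange lo (hi + 1) := by
  by_cases hlh : lo ≤ hi
  · have e0 : List.filter p (PySem.List.pyRange 1 lo) = [] := by
      rw [List.filter_eq_nil_iff]
      intro x hx hc
      rw [PySem.List.mem_pyRange_one] at hx
      rw [hp x (by omega) (by omega)] at hc; omega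
    have e1 : List.filter p (PySem.List.pyRange lo (hi + 1)) = PySem.List.pyRange lo (hi + 1) := by
      rw [List.filter_eq_self]
      intro x hx
      rw [PySem.List.mem_pyRange_one] at hx
      rw [hp x (by omega) (by omega)]; omega
    have e2 : List.filter p (PySem.List.pyRange (hi + 1) 8) = [] := by
      rw [List.filter_eq_nil_iff]
      intro x hx hc
      rw [PySem.List.mem_pyRange_one] at hx
      rw [hp x (by omega) (by omega)] at hc; omega
    rw [PySem.List.pyRange_one_append 1 lo 8 h1 (by omega),
        PySem.List.pyRange_one_append lo (hi + 1) 8 (by omega) (by omega),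
        List.filter_append, List.filter_append, e0, e1, e2]
    simp
  · rw [PySem.List.pyRange_one_eq_nil (by omega : hi + 1 ≤ lo), List.filter_eq_nil_iff]
    intro x hx hc
    rw [PySem.List.mem_pyRange_one] at hx
    rw [hp x (by omega) (by omega)] at hc; omega

lemma ray_step (f r dx dy : Int) (hdx : dx = -1 ∨ dx = 0 ∨ dx = 1) (hdy : dy = -1 ∨ dy = 0 ∨ dy = 1)
    (g : Int → String) (acc : List String) :
    (PySem.List.pyRange 1 8).foldl
      (fun squares i =>
        if (decide (0 ≤ f + dx * i) && decide (f + dx * i ≤ 7) && decide (0 ≤ r + dy * i) && decide (r + dy * i ≤ 7)) = true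
        then squares ++ [g i] else squares) acc
    = acc ++ (PySem.List.pyRange (max 1 (max (rayBounds f dx).1 (rayBounds r dy).1))
        (min 7 (min (rayBounds f dx).2 (rayBounds r dy).2) + 1)).map g := by
  rw [PySem.List.foldl_append_if]
  congr 1
  congr 1
  apply filter_interval
  · exact le_max_left 1 _
  · exact min_le_left 7 _
  · intro i hi1 hi7
    simp only [Bool.and_eq_true, decide_eq_true_eq]
    rcases hdx with h | h | h <;> rcases hdy with h' | h' | h' <;> subst h h' <;>
      norm_num [rayBounds, max_def, min_def] <;> first | omega | (split_ifs <;> omega)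

-- ===== VERDICT (by name: the statement is the Claim_ definition above) =====
theorem get_move_squares_spec : Claim_equal_get_move_squares := by
  intro from_pos board _ _
  unfold Spec_get_move_squares get_move_squares get_move_squares_alt
  cases PySem.Str.pyGet? from_pos 0 with
  | none => rfl
  | some c0 =>
    cases PySem.Str.pyGet? from_pos 1 with
    | none => rfl
    | some c1 =>
      simp only [Option.bind_some]
      cases PySem.Int.ofChars? [c1] with
      | none => rfl
      | some v =>
        simp only [Option.map_some, Option.getD_some, List.foldl_cons, List.foldl_nil]
        rw [ray_step _ _ 0 1 (by omega) (by omega),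
            ray_step _ _ 0 (-1) (by omega) (by omega),
            ray_step _ _ 1 0 (by omega) (by omega),
            ray_step _ _ (-1) 0 (by omega) (by omega),
            ray_step _ _ 1 1 (by omega) (by omega),
            ray_step _ _ 1 (-1) (by omega) (by omega),
            ray_step _ _ (-1) 1 (by omega) (by omega),
            ray_step _ _ (-1) (-1) (by omega) (by omega)]
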